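-- pv_equiv track=rewrite | github.com/Tesser3kt/GEVO | 4.AB/quiz/4a1/uloha-1-b.py | divna_morseovka
-- ===== SOURCE A (Python) =====
-- def divna_morseovka(zprava):
--     pocet_tecek = 0
--     pocet_carek = 0
--
--     for znak in zprava:
--         if znak == ".":
--             pocet_tecek = pocet_tecek + 1
--         elif znak == "-":
--             pocet_carek = pocet_carek + 1
--         else:
--             return False
--
--     return pocet_tecek == pocet_carek
-- ===== SOURCE B (Python) =====
-- def divna_morseovka(zprava):
--     n = len(zprava)
--     if n % 2 == 1:
--         return False
--     k = n // 2
--     return sorted(zprava) == ["-"] * k + ["."] * k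
-- ===== Notes on version B (the rewrite author's own statement) =====
-- stated objective: alternative
-- what changed: Replaces the single counting loop by a canonical-form check: the string is valid iff its length is even and sorting its characters yields exactly k dashes followed by k dots.
import Mathlib
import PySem

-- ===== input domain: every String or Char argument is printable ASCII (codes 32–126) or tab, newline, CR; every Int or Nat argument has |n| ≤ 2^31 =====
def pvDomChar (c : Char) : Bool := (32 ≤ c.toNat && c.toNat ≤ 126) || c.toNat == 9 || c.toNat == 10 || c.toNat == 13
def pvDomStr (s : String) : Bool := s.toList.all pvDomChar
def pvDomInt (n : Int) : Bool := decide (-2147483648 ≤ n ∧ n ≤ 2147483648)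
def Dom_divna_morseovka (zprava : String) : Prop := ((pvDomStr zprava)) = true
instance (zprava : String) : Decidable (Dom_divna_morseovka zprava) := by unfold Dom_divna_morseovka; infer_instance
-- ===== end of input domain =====

-- B checks a canonical form — length even and sorted characters equal to k dashes followed by k dots — instead of A's early-exit counting loop (alternative algorithm, same behaviour).

-- ===== PORT A =====
-- A's for-loop with early return: recursion over the characters carrying the two counters
def divnaLoop : List Char → Int → Int → Bool
  | [], pocet_tecek, pocet_carek => pocet_tecek == pocet_carek
  | znak :: rest, pocet_tecek, pocet_carek =>
    if znak == '.' then divnaLoop rest (pocet_tecek + 1) pocet_carek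
    else if znak == '-' then divnaLoop rest pocet_tecek (pocet_carek + 1)
    else false

def divna_morseovka (zprava : String) : Bool :=
  divnaLoop zprava.toList 0 0

-- ===== PORT B =====
-- Source B: n = len(zprava); if n % 2 == 1: return False; k = n // 2; return sorted(zprava) == ["-"]*k + ["."]*k
def divna_morseovka_alt (zprava : String) : Bool :=
  let n := zprava.toList.length
  if n % 2 == 1 then false
  else
    let k := n / 2
    PySem.List.sorted zprava.toList (fun x => x) false == List.replicate k '-' ++ List.replicate k '.'

-- ===== PRECONDITION & SPEC =====
def Spec_divna_morseovka (zprava : String) (out : Bool) : Prop := out = divna_morseovka_alt zprava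
instance (zprava : String) (out : Bool) : Decidable (Spec_divna_morseovka zprava out) := by unfold Spec_divna_morseovka; infer_instance

-- ===== CLAIM (what is proved, stated in full; the proofs are below) =====
def Claim_equal_divna_morseovka : Prop := ∀ (zprava : String), Dom_divna_morseovka zprava → Spec_divna_morseovka zprava (divna_morseovka zprava)

-- ===== LEMMAS AND PROOFS =====

-- Characterisation of A's loop: all characters valid, and the running counters plus the remaining counts balance.
theorem divnaLoop_char (l : List Char) (t c : Int) :
    divnaLoop l t c =
      if l.all (fun ch => ch == '.' || ch == '-') then
        decide (t + (l.count '.' : Int) = c + (l.count '-' : Int))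
      else false := by
  induction l generalizing t c with
  | nil =>
    simp only [divnaLoop, List.all_nil, if_pos rfl, List.count_nil]
    apply Bool.eq_iff_iff.mpr; simp
  | cons x xs ih =>
    simp only [divnaLoop, List.all_cons]
    by_cases hx : x = '.'
    · subst hx
      simp only [ih]
      by_cases h : xs.all (fun ch => ch == '.' || ch == '-') <;>
        simp [h, List.count_cons] <;> push_cast <;> constructor <;> intro <;> omega
    · by_cases hy : x = '-'
      · subst hy
        simp only [ih]
        by_cases h : xs.all (fun ch => ch == '.' || ch == '-') <;>
          simp [hx, h, List.count_cons] <;> push_cast <;> constructor <;> intro <;> omega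
      · simp [hx, hy]

-- The canonical target: k dashes then k dots; its counts.
theorem count_target (k : Nat) (c : Char) :
    (List.replicate k '-' ++ List.replicate k '.').count c
      = if c = '-' then k else if c = '.' then k else 0 := by
  by_cases h1 : c = '-'
  · subst h1; simp [List.count_append, List.count_replicate]
  · by_cases h2 : c = '.'
    · subst h2; simp [List.count_append, List.count_replicate]
    · have h1' : ('-' : Char) ≠ c := fun h => h1 h.symm
      have h2' : ('.' : Char) ≠ c := fun h => h2 h.symm
      simp [List.count_append, List.count_replicate, h1, h2, h1', h2']

-- A list of dots and dashes with equal counts k is a permutation of the canonical target.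
theorem perm_target (l : List Char) (hall : l.all (fun ch => ch == '.' || ch == '-') = true)
    (k : Nat) (hk : l.count '.' = k) (hk' : l.count '-' = k) :
    (List.replicate k '-' ++ List.replicate k '.').Perm l := by
  rw [List.perm_iff_count]
  intro c
  rw [count_target]
  by_cases h1 : c = '-'
  · simp [h1, hk']
  · by_cases h2 : c = '.'
    · simp [h2, hk]
    · simp only [h1, h2, if_false]
      symm
      rw [List.count_eq_zero]
      intro hc
      have := List.all_eq_true.mp hall c hc
      simp at this
      rcases this with h | h <;> [exact h2 h; exact h1 h]

-- The canonical target is weakly increasing ('-' < '.').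
theorem target_pairwise (k : Nat) :
    (List.replicate k '-' ++ List.replicate k '.').Pairwise (· ≤ ·) := by
  rw [List.pairwise_append]
  refine ⟨List.pairwise_replicate.mpr (Or.inr le_rfl),
          List.pairwise_replicate.mpr (Or.inr le_rfl), ?_⟩
  intro a ha b hb
  rw [List.eq_of_mem_replicate ha, List.eq_of_mem_replicate hb]
  decide

-- On a valid string the length is the sum of the two counts.
theorem length_eq_counts (l : List Char)
    (hall : l.all (fun ch => ch == '.' || ch == '-') = true) :
    l.length = l.count '.' + l.count '-' := by
  induction l with
  | nil => simp
  | cons x xs ih =>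
    simp only [List.all_cons, Bool.and_eq_true] at hall
    have hrec := ih hall.2
    have hx := hall.1
    simp only [List.length_cons, List.count_cons]
    rcases Bool.or_eq_true_iff.mp hx with h | h <;> rw [beq_iff_eq] at h <;> subst h <;>
      simp [hrec] <;> omega

-- ===== VERDICT (by name: the statement is the Claim_ definition above) =====
theorem divna_morseovka_spec : Claim_equal_divna_morseovka := by
  intro zprava _
  unfold Spec_divna_morseovka divna_morseovka divna_morseovka_alt
  set l := zprava.toList with hl
  simp only []
  rw [divnaLoop_char]
  apply Bool.eq_iff_iff.mpr
  constructor
  · intro h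
    split_ifs at h with hall
    · rw [decide_eq_true_eq] at h
      have hcnt : l.count '.' = l.count '-' := by omega
      have hlen := length_eq_counts l hall
      have heven : (l.length % 2 == 1) = false := by
        rw [beq_eq_false_iff_ne]; omega
      simp only [heven, Bool.false_eq_true, if_false]
      rw [beq_iff_eq]
      have hk : l.length / 2 = l.count '.' := by omega
      rw [hk]
      exact PySem.List.sorted_id_eq_of_perm_of_pairwise _ _
        (perm_target l hall (l.count '.') rfl hcnt.symm) (target_pairwise _)
  · intro h
    by_cases hodd : (l.length % 2 == 1) = true
    · simp [hodd] at h
    · rw [Bool.not_eq_true] at hodd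
      simp only [hodd, Bool.false_eq_true, if_false, beq_iff_eq] at h
      have hperm : (List.replicate (l.length / 2) '-' ++ List.replicate (l.length / 2) '.').Perm l := by
        rw [← h]; exact PySem.List.sorted_perm l (fun x => x) false
      have hall : l.all (fun ch => ch == '.' || ch == '-') = true := by
        rw [List.all_eq_true]
        intro a ha
        have := hperm.mem_iff.mpr ha
        simp only [List.mem_append, List.mem_replicate] at this
        rcases this with ⟨_, hc⟩ | ⟨_, hc⟩ <;> simp [hc]
      have h1 := hperm.count_eq '.'
      have h2 := hperm.count_eq '-'
      rw [count_target] at h1 h2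
      simp at h1 h2
      rw [if_pos hall, decide_eq_true_eq]
      omega
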